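-- pv_equiv track=rewrite | github.com/paul-schwendenman/advent-of-code | 2015/day03/day3.py | calculate_houses
-- ===== SOURCE A (Python) =====
-- def calculate_houses(path):
--     houses = set()
--     position = (0, 0)
--
--     houses.add(position)
--
--     for location in path:
--         if location == '>':
--             x, y = position
--             position = x + 1, y
--             houses.add(position)
--         elif location == '<':
--             x, y = position
--             position = x - 1, y
--             houses.add(position)
--         elif location == '^':
--             x, y = position
--             position = x, y + 1
--             houses.add(position)
--         elif location == 'v':
--             x, y = position
--             position = x, y - 1
--             houses.add(position)
--
--     return houses
-- ===== SOURCE B (Python) =====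
-- # Divide-and-conquer rewrite: the houses visited along path = houses of the
-- # first half, unioned with the houses of the second half translated by the
-- # first half's net displacement.  Correct because the visited positions are
-- # the prefix sums of the step vectors, and prefix sums of a concatenation are
-- # the prefix sums of the left part followed by the left endpoint plus the
-- # prefix sums of the right part.
-- _DELTA = {'>': (1, 0), '<': (-1, 0), '^': (0, 1), 'v': (0, -1)}
--
--
-- def _solve(seg):
--     """Return (set of positions visited starting from (0,0), net displacement)."""
--     n = len(seg)
--     if n == 0:
--         return {(0, 0)}, (0, 0)
--     if n == 1:
--         d = _DELTA.get(seg, (0, 0))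
--         return {(0, 0), d}, d
--     s1, e1 = _solve(seg[:n // 2])
--     s2, e2 = _solve(seg[n // 2:])
--     return s1 | {(e1[0] + x, e1[1] + y) for (x, y) in s2}, (e1[0] + e2[0], e1[1] + e2[1])
--
--
-- def calculate_houses(path):
--     return _solve(path)[0]
-- ===== Notes on version B (the rewrite author's own statement) =====
-- stated objective: alternative
-- what changed: Replaces A's single imperative walk maintaining a current position and a growing set with a divide-and-conquer recursion: solve each half of the path independently, then union the left half's house set with the right half's set translated by the left half's net displacement.
import Mathlib
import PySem

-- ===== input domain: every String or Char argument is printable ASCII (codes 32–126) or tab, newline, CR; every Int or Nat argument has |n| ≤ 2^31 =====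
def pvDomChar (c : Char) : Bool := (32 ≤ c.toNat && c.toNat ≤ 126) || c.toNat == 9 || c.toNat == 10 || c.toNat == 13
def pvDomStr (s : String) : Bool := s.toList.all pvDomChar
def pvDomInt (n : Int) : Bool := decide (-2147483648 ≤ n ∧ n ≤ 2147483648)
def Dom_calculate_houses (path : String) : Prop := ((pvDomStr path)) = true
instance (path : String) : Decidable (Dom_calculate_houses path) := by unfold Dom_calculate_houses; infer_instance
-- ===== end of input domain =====

-- B replaces A's single imperative walk with a divide-and-conquer recursion: solve each half
-- of the path, then union the left set with the right set translated by the left half's net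
-- displacement (objective: alternative).

-- ===== PORT A =====
def pvLoopA (houses : PySem.Set (Int × Int)) (position : Int × Int) : List Char → PySem.Set (Int × Int)
  | [] => houses
  | location :: rest =>
    if location = '>' then
      let position' : Int × Int := (position.1 + 1, position.2)
      pvLoopA (PySem.Set.add houses position') position' rest
    else if location = '<' then
      let position' : Int × Int := (position.1 - 1, position.2)
      pvLoopA (PySem.Set.add houses position') position' rest
    else if location = '^' then
      let position' : Int × Int := (position.1, position.2 + 1)
      pvLoopA (PySem.Set.add houses position') position' rest
    else if location = 'v' then
      let position' : Int × Int := (position.1, position.2 - 1)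
      pvLoopA (PySem.Set.add houses position') position' rest
    else
      pvLoopA houses position rest

def calculate_houses (path : String) : List (Int × Int) :=
  pvLoopA (PySem.Set.add PySem.Set.empty (0, 0)) (0, 0) path.toList

-- ===== PORT B =====
def pvDeltaTable : PySem.Dict Char (Int × Int) :=
  PySem.Dict.ofList [('>', (1, 0)), ('<', (-1, 0)), ('^', (0, 1)), ('v', (0, -1))]

-- _solve(seg): (set of positions visited from (0,0), net displacement).
-- The set comprehension translates a set by an (injective) vector add, so its result as a
-- set is order-independent; it is ported as ofList of the translated element list.
def pvSolve : List Char → PySem.Set (Int × Int) × (Int × Int)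
  | [] => (PySem.Set.ofList [((0 : Int), (0 : Int))], ((0 : Int), (0 : Int)))
  | [c] =>
    let d := PySem.Dict.getD pvDeltaTable c ((0 : Int), (0 : Int))
    (PySem.Set.ofList [((0 : Int), (0 : Int)), d], d)
  | c1 :: c2 :: rest =>
    let n := (c1 :: c2 :: rest).length
    let L := pvSolve ((c1 :: c2 :: rest).take (n / 2))
    let R := pvSolve ((c1 :: c2 :: rest).drop (n / 2))
    (PySem.Set.union L.1
        (PySem.Set.ofList (R.1.map (fun q => (L.2.1 + q.1, L.2.2 + q.2)))),
      (L.2.1 + R.2.1, L.2.2 + R.2.2))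
termination_by l => l.length
decreasing_by
  · simp [List.length_take]; omega
  · simp [List.length_drop]; omega

def calculate_houses_alt (path : String) : List (Int × Int) :=
  (pvSolve path.toList).1

-- ===== PRECONDITION & SPEC =====
def Spec_calculate_houses (path : String) (out : List (Int × Int)) : Prop := out = calculate_houses_alt path
instance (path : String) (out : List (Int × Int)) : Decidable (Spec_calculate_houses path out) := by unfold Spec_calculate_houses; infer_instance

-- ===== CLAIM (what is proved, stated in full; the proofs are below) =====
def Claim_equal_calculate_houses : Prop := ∀ (path : String), Dom_calculate_houses path → Spec_calculate_houses path (calculate_houses path)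

-- ===== LEMMAS AND PROOFS =====

/-- The delta B's table assigns to a character. -/
def pvDelta (c : Char) : Int × Int := PySem.Dict.getD pvDeltaTable c (0, 0)

/-- Net displacement of a path segment. -/
def pvEnd : List Char → Int × Int
  | [] => (0, 0)
  | c :: cs => ((pvDelta c).1 + (pvEnd cs).1, (pvDelta c).2 + (pvEnd cs).2)

/-- All running positions (including the start) when walking a segment from `p`. -/
def pvPos (p : Int × Int) : List Char → List (Int × Int)
  | [] => [p]
  | c :: cs => p :: pvPos (p.1 + (pvDelta c).1, p.2 + (pvDelta c).2) cs

/-- The running positions after the start, as a function of start `p` and the delta list. -/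
def pvTail (p : Int × Int) : List (Int × Int) → List (Int × Int)
  | [] => []
  | d :: ds => (p.1 + d.1, p.2 + d.2) :: pvTail (p.1 + d.1, p.2 + d.2) ds

lemma pvDelta_default (c : Char) (h1 : ¬ c = '>') (h2 : ¬ c = '<') (h3 : ¬ c = '^')
    (h4 : ¬ c = 'v') : pvDelta c = (0, 0) := by
  have ht : pvDeltaTable =
      (((PySem.Dict.empty.insert '>' ((1 : Int), (0 : Int))).insert '<'
        (-1, 0)).insert '^' (0, 1)).insert 'v' (0, -1) := by rfl
  simp [pvDelta, ht, PySem.Dict.getD_insert, h1, h2, h3, h4, PySem.Dict.getD_empty]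

lemma pvLoopA_eq (l : List Char) : ∀ (S : PySem.Set (Int × Int)) (p : Int × Int), p ∈ S →
    pvLoopA S p l = (pvTail p (l.map pvDelta)).foldl PySem.Set.add S := by
  induction l with
  | nil => intro S p _; simp [pvLoopA, pvTail]
  | cons c rest ih =>
    intro S p hp
    by_cases h1 : c = '>'
    · subst h1
      have hd : pvDelta '>' = (1, 0) := by decide
      simp only [pvLoopA, List.map_cons, hd, pvTail, List.foldl_cons]
      rw [ih _ _ (by simp [PySem.Set.mem_add])]
      simp
    · by_cases h2 : c = '<'
      · subst h2
        have hd : pvDelta '<' = (-1, 0) := by decide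
        simp only [pvLoopA, if_neg (by decide : ¬ ('<' : Char) = '>'),
          List.map_cons, hd, pvTail, List.foldl_cons]
        rw [ih _ _ (by simp [PySem.Set.mem_add])]
        simp [sub_eq_add_neg]
      · by_cases h3 : c = '^'
        · subst h3
          have hd : pvDelta '^' = (0, 1) := by decide
          simp only [pvLoopA, if_neg (by decide : ¬ ('^' : Char) = '>'),
            if_neg (by decide : ¬ ('^' : Char) = '<'),
            List.map_cons, hd, pvTail, List.foldl_cons]
          rw [ih _ _ (by simp [PySem.Set.mem_add])]
          simp
        · by_cases h4 : c = 'v'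
          · subst h4
            have hd : pvDelta 'v' = (0, -1) := by decide
            simp only [pvLoopA, if_neg (by decide : ¬ ('v' : Char) = '>'),
              if_neg (by decide : ¬ ('v' : Char) = '<'),
              if_neg (by decide : ¬ ('v' : Char) = '^'),
              List.map_cons, hd, pvTail, List.foldl_cons]
            rw [ih _ _ (by simp [PySem.Set.mem_add])]
            simp [sub_eq_add_neg]
          · have hd : pvDelta c = (0, 0) := pvDelta_default c h1 h2 h3 h4
            simp only [pvLoopA, if_neg h1, if_neg h2, if_neg h3, if_neg h4,
              List.map_cons, hd, pvTail, List.foldl_cons]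
            rw [ih _ _ hp]
            simp [PySem.Set.add_of_mem hp]

lemma pvPos_cons_tail (p : Int × Int) (l : List Char) :
    pvPos p l = p :: (pvPos p l).tail := by cases l <;> rfl

lemma pvPos_eq_cons_pvTail (l : List Char) : ∀ p, pvPos p l = p :: pvTail p (l.map pvDelta) := by
  induction l with
  | nil => intro p; rfl
  | cons c cs ih => intro p; simp only [pvPos, List.map_cons, pvTail, ih]

lemma pvEnd_append (l1 l2 : List Char) :
    pvEnd (l1 ++ l2) = ((pvEnd l1).1 + (pvEnd l2).1, (pvEnd l1).2 + (pvEnd l2).2) := by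
  induction l1 with
  | nil => simp [pvEnd]
  | cons c cs ih => simp [pvEnd, ih]; constructor <;> ring

lemma pvPos_append (l1 l2 : List Char) : ∀ p : Int × Int,
    pvPos p (l1 ++ l2) =
      pvPos p l1 ++ (pvPos (p.1 + (pvEnd l1).1, p.2 + (pvEnd l1).2) l2).tail := by
  induction l1 with
  | nil =>
    intro p
    simp only [List.nil_append, pvPos, pvEnd, add_zero]
    conv_lhs => rw [pvPos_cons_tail p l2]
    simp
  | cons c cs ih =>
    intro p
    simp only [List.cons_append, pvPos, ih, pvEnd, List.cons_append]
    have : ((p.1 + (pvDelta c).1) + (pvEnd cs).1, (p.2 + (pvDelta c).2) + (pvEnd cs).2)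
        = (p.1 + ((pvDelta c).1 + (pvEnd cs).1), p.2 + ((pvDelta c).2 + (pvEnd cs).2)) := by
      simp [add_assoc]
    rw [this]

lemma pvPos_translate (a b : Int) (l : List Char) : ∀ p : Int × Int,
    (pvPos p l).map (fun q => (a + q.1, b + q.2)) = pvPos (a + p.1, b + p.2) l := by
  induction l with
  | nil => intro p; rfl
  | cons c cs ih =>
    intro p
    simp only [pvPos, List.map_cons, ih]
    have : (a + (p.1 + (pvDelta c).1), b + (p.2 + (pvDelta c).2))
        = ((a + p.1) + (pvDelta c).1, (b + p.2) + (pvDelta c).2) := by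
      simp [add_assoc]
    rw [this]

lemma pvPos_end_mem (l : List Char) : ∀ p : Int × Int,
    (p.1 + (pvEnd l).1, p.2 + (pvEnd l).2) ∈ pvPos p l := by
  induction l with
  | nil => intro p; simp [pvPos, pvEnd]
  | cons c cs ih =>
    intro p
    simp only [pvPos, pvEnd, List.mem_cons]
    right
    have := ih (p.1 + (pvDelta c).1, p.2 + (pvDelta c).2)
    simpa [add_assoc] using this

lemma pvUpdate_ofList {α : Type} [BEq α] [LawfulBEq α] (s : PySem.Set α) (xs : List α) :
    s.update (PySem.Set.ofList xs) = s.update xs := by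
  rw [PySem.Set.update_eq_append_filter, PySem.Set.update_eq_append_filter,
    PySem.Set.ofList_ofList]

lemma pvMap_trans_add (a b : Int) (s : PySem.Set (Int × Int)) (x : Int × Int) :
    (PySem.Set.add s x).map (fun q => (a + q.1, b + q.2)) =
      PySem.Set.add (s.map (fun q => (a + q.1, b + q.2))) (a + x.1, b + x.2) := by
  have hmem : x ∈ s ↔ ((a + x.1, b + x.2) ∈ s.map (fun q => (a + q.1, b + q.2))) := by
    constructor
    · intro h; exact List.mem_map_of_mem h
    · intro h
      rcases List.mem_map.mp h with ⟨q, hq, he⟩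
      have h1 : q.1 = x.1 := by
        have := congrArg Prod.fst he; simp at this; omega
      have h2 : q.2 = x.2 := by
        have := congrArg Prod.snd he; simp at this; omega
      have : q = x := Prod.ext h1 h2
      rwa [this] at hq
  by_cases hx : x ∈ s
  · rw [PySem.Set.add_of_mem hx, PySem.Set.add_of_mem (hmem.mp hx)]
  · rw [PySem.Set.add_of_not_mem hx, PySem.Set.add_of_not_mem (fun h => hx (hmem.mpr h))]
    simp

lemma pvMap_trans_ofList (a b : Int) (L : List (Int × Int)) :
    (PySem.Set.ofList L).map (fun q => (a + q.1, b + q.2)) =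
      PySem.Set.ofList (L.map (fun q => (a + q.1, b + q.2))) := by
  induction L using List.reverseRecOn with
  | nil => rfl
  | append_singleton xs x ih =>
    rw [PySem.Set.ofList_append_singleton, pvMap_trans_add, ih, List.map_append,
      List.map_singleton, PySem.Set.ofList_append_singleton]

lemma pvSolve_eq : ∀ (n : Nat) (l : List Char), l.length ≤ n →
    pvSolve l = (PySem.Set.ofList (pvPos ((0 : Int), (0 : Int)) l), pvEnd l) := by
  intro n
  induction n with
  | zero =>
    intro l hl
    have : l = [] := List.length_eq_zero_iff.mp (Nat.le_zero.mp hl)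
    subst this
    rw [pvSolve]
    decide
  | succ n ih =>
    intro l hl
    match l with
    | [] => rw [pvSolve]; decide
    | [c] =>
      rw [pvSolve]
      have hd : PySem.Dict.getD pvDeltaTable c ((0 : Int), (0 : Int)) = pvDelta c := rfl
      simp only [hd, pvPos, pvEnd]
      simp
    | c1 :: c2 :: rest =>
      have hlen : (c1 :: c2 :: rest).length = rest.length + 2 := by simp
      set L : List Char := c1 :: c2 :: rest with hL
      set k : Nat := L.length / 2 with hk
      have hk1 : 1 ≤ k := by rw [hk, hlen]; omega
      have hkl : k < L.length := by rw [hk]; omega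
      have h1 : (L.take k).length ≤ n := by
        rw [List.length_take]; rw [hlen] at hl ⊢; omega
      have h2 : (L.drop k).length ≤ n := by
        rw [List.length_drop]; rw [hlen] at hl ⊢; rw [hk, hlen]; omega
      have e1 := ih (L.take k) h1
      have e2 := ih (L.drop k) h2
      rw [show pvSolve L =
          (PySem.Set.union (pvSolve (L.take k)).1
            (PySem.Set.ofList ((pvSolve (L.drop k)).1.map
              (fun q => ((pvSolve (L.take k)).2.1 + q.1, (pvSolve (L.take k)).2.2 + q.2)))),
           ((pvSolve (L.take k)).2.1 + (pvSolve (L.drop k)).2.1,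
            (pvSolve (L.take k)).2.2 + (pvSolve (L.drop k)).2.2)) from by
        rw [hL]; rw [pvSolve]]
      rw [e1, e2]
      have htd : L.take k ++ L.drop k = L := List.take_append_drop k L
      refine Prod.ext ?_ ?_
      · -- the set component
        dsimp only
        set l1 := L.take k
        set l2 := L.drop k
        set E : Int × Int := pvEnd l1 with hE
        have hrhs : PySem.Set.ofList (pvPos ((0 : Int), (0 : Int)) L) =
            (PySem.Set.ofList (pvPos (0, 0) l1)).update ((pvPos (E.1, E.2) l2).tail) := by
          rw [← htd, pvPos_append]
          simp only [zero_add]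
          rw [PySem.Set.ofList_append]
        rw [hrhs]
        show (PySem.Set.ofList (pvPos (0, 0) l1)).update
            (PySem.Set.ofList ((PySem.Set.ofList (pvPos (0, 0) l2)).map
              (fun q => (E.1 + q.1, E.2 + q.2)))) = _
        rw [pvUpdate_ofList, pvMap_trans_ofList, pvUpdate_ofList, pvPos_translate]
        have hmemE : ((E.1 + 0, E.2 + 0) : Int × Int) ∈
            PySem.Set.ofList (pvPos ((0 : Int), (0 : Int)) l1) := by
          rw [PySem.Set.mem_ofList]
          simpa using pvPos_end_mem l1 (0, 0)
        rw [pvPos_cons_tail (E.1 + 0, E.2 + 0) l2, PySem.Set.update_cons,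
          PySem.Set.add_of_mem hmemE]
        simp
      · dsimp only
        rw [← htd, pvEnd_append, htd]

-- ===== VERDICT (by name: the statement is the Claim_ definition above) =====
theorem calculate_houses_spec : Claim_equal_calculate_houses := by
  intro path _
  unfold Spec_calculate_houses calculate_houses calculate_houses_alt
  rw [pvLoopA_eq _ _ _ (by decide)]
  rw [pvSolve_eq path.toList.length path.toList (le_refl _)]
  show _ = PySem.Set.ofList (pvPos (0, 0) path.toList)
  rw [pvPos_eq_cons_pvTail]
  rfl
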